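-- pv_equiv track=rewrite | github.com/Andy87877/NTUT_Python | practice_homework/25.py | check_Error_input
-- ===== SOURCE A (Python) =====
-- def check_Error_input(Total_card):
--     Color_All_card = ["S","H","D","C"]
--     Face_All_card = ["A","2","3","4","5","6","7","8","9","10","J","Q","K"]
--
--     for i in range(len(Total_card)):
--         card = Total_card[i]
--         color = "."
--         face = "."
--
--         if (len(card) == 2):
--             color = card[0]
--             face = card[1]
--         elif (len(card) == 3):
--             if (card[1] == '1' and card[2] == '0'):
--                 face = "10"
--             else:
--                 return True
--
--             color = card[0]
--         else:
--             return True
--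
--         if (not(color in Color_All_card)):
--             return True
--         if (not(face in Face_All_card)):
--             return True
--
--     return False
-- ===== SOURCE B (Python) =====
-- def check_Error_input(Total_card):
--     valid = {c + f for c in "SHDC"
--              for f in ["A", "2", "3", "4", "5", "6", "7", "8", "9", "10", "J", "Q", "K"]}
--     return any(card not in valid for card in Total_card)
-- ===== Notes on version B (the rewrite author's own statement) =====
-- stated objective: simpler
-- what changed: Replaces the length-branching per-card parsing loop with a precomputed 52-element set of all valid card strings and a single membership pass (any card not in valid).
import Mathlib
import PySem

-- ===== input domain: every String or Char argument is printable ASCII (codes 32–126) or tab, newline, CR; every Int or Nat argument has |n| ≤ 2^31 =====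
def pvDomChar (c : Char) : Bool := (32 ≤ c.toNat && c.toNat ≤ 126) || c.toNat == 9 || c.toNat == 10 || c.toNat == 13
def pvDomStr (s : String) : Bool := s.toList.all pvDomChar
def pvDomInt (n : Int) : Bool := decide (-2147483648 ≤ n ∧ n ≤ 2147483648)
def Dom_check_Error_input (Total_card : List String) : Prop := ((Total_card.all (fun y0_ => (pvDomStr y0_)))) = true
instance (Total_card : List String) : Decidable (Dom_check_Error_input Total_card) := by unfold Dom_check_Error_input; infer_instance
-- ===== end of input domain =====

-- B replaces A's per-card length-branching parser with a precomputed set of all 52 valid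
-- card strings and a single membership pass (objective: simpler).

-- ===== PORT A =====
-- A compares the color and face substrings of each card against its two literal lists;
-- single-character Python strings are modelled as singleton Char lists, card[a] via
-- PySem.Str.pyGet? (the .getD default mirrors A's initial color = face = "." and is
-- never reached under the length guard of the branch it occurs in).
def pvColorAll : List (List Char) := [['S'],['H'],['D'],['C']]
def pvFaceAll : List (List Char) :=
  [['A'],['2'],['3'],['4'],['5'],['6'],['7'],['8'],['9'],['1','0'],['J'],['Q'],['K']]

def pvGoA : List String → Bool
  | [] => false
  | card :: rest =>
    if PySem.Str.len card = 2 then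
      let color := ((PySem.Str.pyGet? card 0).map (fun c => [c])).getD ['.']
      let face  := ((PySem.Str.pyGet? card 1).map (fun c => [c])).getD ['.']
      if ¬ (color ∈ pvColorAll) then true
      else if ¬ (face ∈ pvFaceAll) then true
      else pvGoA rest
    else if PySem.Str.len card = 3 then
      if PySem.Str.pyGet? card 1 = some '1' ∧ PySem.Str.pyGet? card 2 = some '0' then
        let face : List Char := ['1','0']
        let color := ((PySem.Str.pyGet? card 0).map (fun c => [c])).getD ['.']
        if ¬ (color ∈ pvColorAll) then true
        else if ¬ (face ∈ pvFaceAll) then true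
        else pvGoA rest
      else true
    else true

def check_Error_input (Total_card : List String) : Bool := pvGoA Total_card

-- ===== PORT B =====
-- Source B: valid = {c + f for c in "SHDC" for f in [...]}; return any(card not in valid ...).
def pvFaces : List String := ["A","2","3","4","5","6","7","8","9","10","J","Q","K"]

def pvValid : PySem.Set String :=
  PySem.Set.ofList (("SHDC".toList).flatMap (fun c =>
    pvFaces.map (fun f => String.ofList (c :: f.toList))))

def check_Error_input_alt (Total_card : List String) : Bool :=
  Total_card.any (fun card => ! pvValid.contains card)

-- ===== PRECONDITION & SPEC =====
def Spec_check_Error_input (Total_card : List String) (out : Bool) : Prop := out = check_Error_input_alt Total_card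
instance (Total_card : List String) (out : Bool) : Decidable (Spec_check_Error_input Total_card out) := by unfold Spec_check_Error_input; infer_instance

-- ===== CLAIM (what is proved, stated in full; the proofs are below) =====
def Claim_equal_check_Error_input : Prop := ∀ (Total_card : List String), Dom_check_Error_input Total_card → Spec_check_Error_input Total_card (check_Error_input Total_card)

-- ===== LEMMAS AND PROOFS =====

lemma pv_ofList_inj (l m : List Char) : String.ofList l = String.ofList m ↔ l = m := by
  constructor
  · intro h; have := congrArg String.toList h; simpa using this
  · rintro rfl; rfl

lemma pv_faces_toList : pvFaces.map String.toList
    = [['A'],['2'],['3'],['4'],['5'],['6'],['7'],['8'],['9'],['1','0'],['J'],['Q'],['K']] := by decide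

lemma pv_shdc : "SHDC".toList = ['S','H','D','C'] := by decide

-- the valid-card shape: a color character followed by the characters of a face
def pvShape (l : List Char) : Prop :=
  ∃ c ∈ ['S','H','D','C'],
    ∃ fl ∈ [['A'],['2'],['3'],['4'],['5'],['6'],['7'],['8'],['9'],['1','0'],['J'],['Q'],['K']],
      l = c :: fl

lemma contains_iff (l : List Char) :
    pvValid.contains (String.ofList l) = true ↔ pvShape l := by
  unfold pvShape
  simp only [pvValid, PySem.Set.contains, PySem.Set.mem_ofList, List.mem_flatMap, List.mem_map,
    List.contains_iff_mem, pv_shdc, ← pv_faces_toList]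
  constructor
  · rintro ⟨c, hc, f, hf, he⟩
    exact ⟨c, hc, f.toList, ⟨f, hf, rfl⟩, ((pv_ofList_inj _ _).mp he).symm⟩
  · rintro ⟨c, hc, fl, ⟨f, hf, rfl⟩, rfl⟩
    exact ⟨c, hc, f, hf, rfl⟩

lemma shape_len {l : List Char} (h : pvShape l) : l.length = 2 ∨ l.length = 3 := by
  obtain ⟨c, hc, fl, hfl, rfl⟩ := h
  fin_cases hfl <;> simp

lemma shape2_iff (a b : Char) : pvShape [a,b] ↔
    (a = 'S' ∨ a = 'H' ∨ a = 'D' ∨ a = 'C') ∧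
    (b = 'A' ∨ b = '2' ∨ b = '3' ∨ b = '4' ∨ b = '5' ∨ b = '6' ∨ b = '7' ∨ b = '8' ∨ b = '9' ∨
      b = 'J' ∨ b = 'Q' ∨ b = 'K') := by
  constructor
  · rintro ⟨c, hc, fl, hfl, heq⟩
    obtain ⟨rfl, rfl⟩ : c = a ∧ fl = [b] := by
      have := heq; simp only [List.cons.injEq] at this; tauto
    simp only [List.mem_cons] at hc hfl
    constructor
    · tauto
    · rcases hfl with h|h|h|h|h|h|h|h|h|h|h|h|h <;> simp only [List.cons.injEq] at h <;> tauto
  · rintro ⟨ha, hb⟩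
    refine ⟨a, by simp; tauto, [b], ?_, rfl⟩
    rcases hb with rfl|rfl|rfl|rfl|rfl|rfl|rfl|rfl|rfl|rfl|rfl|rfl <;> simp

lemma shape3_iff (a b c : Char) : pvShape [a,b,c] ↔
    (a = 'S' ∨ a = 'H' ∨ a = 'D' ∨ a = 'C') ∧ b = '1' ∧ c = '0' := by
  constructor
  · rintro ⟨c', hc, fl, hfl, heq⟩
    obtain ⟨rfl, rfl⟩ : c' = a ∧ fl = [b, c] := by
      have := heq; simp only [List.cons.injEq] at this; tauto
    simp only [List.mem_cons] at hc hfl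
    refine ⟨by tauto, ?_⟩
    rcases hfl with h|h|h|h|h|h|h|h|h|h|h|h|h <;> simp only [List.cons.injEq] at h <;> tauto
  · rintro ⟨ha, rfl, rfl⟩
    exact ⟨a, by simp; tauto, ['1','0'], by simp, rfl⟩

set_option maxRecDepth 4096 in
lemma pvGoA_cons (card : String) (rest : List String) :
    pvGoA (card :: rest) = ((!(pvValid.contains card)) || pvGoA rest) := by
  obtain ⟨l, rfl⟩ : ∃ l, card = String.ofList l := ⟨card.toList, String.ofList_toList.symm⟩
  rw [Bool.eq_iff_iff, show ((!pvValid.contains (String.ofList l) || pvGoA rest) = true) ↔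
      (¬ (pvValid.contains (String.ofList l) = true) ∨ pvGoA rest = true) from by simp,
    contains_iff l]
  match l with
  | [] =>
    have h : ¬ pvShape [] := fun h => by rcases shape_len h with h|h <;> simp at h
    simp [pvGoA, PySem.Str.len, h]
  | [a] =>
    have h : ¬ pvShape [a] := fun h => by rcases shape_len h with h|h <;> simp at h
    simp [pvGoA, PySem.Str.len, h]
  | [a,b] =>
    rw [shape2_iff]
    simp [pvGoA, pvColorAll, pvFaceAll, PySem.Str.len]
    tauto
  | [a,b,c] =>
    rw [shape3_iff]
    simp [pvGoA, pvColorAll, pvFaceAll, PySem.Str.len]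
    tauto
  | a::b::c::d::t =>
    have h : ¬ pvShape (a::b::c::d::t) := fun h => by rcases shape_len h with h|h <;> simp at h
    have h2 : ((t.length : Int) + 1 + 1 + 1 + 1) ≠ 2 := by omega
    have h3 : ((t.length : Int) + 1 + 1 + 1 + 1) ≠ 3 := by omega
    simp [pvGoA, PySem.Str.len, h, h2, h3]

lemma goA_eq_alt (l : List String) : pvGoA l = check_Error_input_alt l := by
  induction l with
  | nil => rfl
  | cons card rest ih =>
    rw [pvGoA_cons, check_Error_input_alt, List.any_cons, show (rest.any fun card => ! pvValid.contains card) = check_Error_input_alt rest from rfl, ← ih]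

-- ===== VERDICT (by name: the statement is the Claim_ definition above) =====
theorem check_Error_input_spec : Claim_equal_check_Error_input := by
  intro Total_card _
  unfold Spec_check_Error_input check_Error_input
  exact goA_eq_alt Total_card
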